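-- pv_equiv track=rewrite | github.com/shxd10/mkw-scripts | scripts/geckoscript_TEST/decoder.py | split_gecko_blocks
-- ===== SOURCE A (Python) =====
-- def split_gecko_blocks(code: str) -> list[str]:
--     blocks = []
--     current_block = []
--
--     codetypes = ("04", "14", "05", "15", "06", "07", "16", "17", "C0", "C2", "C3", "D2", "D3", "F2", "F3", "F4", "F5")
--
--     for line in code.strip().splitlines():
--         if line[:2] in codetypes and current_block:
--             blocks.append("\n".join(current_block))
--             current_block = []
--         current_block.append(line)
--
--     if current_block:
--         blocks.append("\n".join(current_block))
--
--     return blocks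
-- ===== SOURCE B (Python) =====
-- def split_gecko_blocks(code: str) -> list[str]:
--     CODETYPES = ("04", "14", "05", "15", "06", "07", "16", "17", "C0", "C2", "C3", "D2", "D3", "F2", "F3", "F4", "F5")
--     lines = code.strip().splitlines()
--     blocks = []
--     i, n = 0, len(lines)
--     while i < n:
--         j = i + 1
--         while j < n and lines[j][:2] not in CODETYPES:
--             j += 1
--         blocks.append("\n".join(lines[i:j]))
--         i = j
--     return blocks
-- ===== Notes on version B (the rewrite author's own statement) =====
-- stated objective: alternative
-- what changed: A accumulates lines in a mutable current_block and flushes it whenever a codetype prefix starts a new block; B scans with two index pointers, finding each block's end and slicing lines[i:j] out directly, with no accumulator state.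
import Mathlib
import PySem

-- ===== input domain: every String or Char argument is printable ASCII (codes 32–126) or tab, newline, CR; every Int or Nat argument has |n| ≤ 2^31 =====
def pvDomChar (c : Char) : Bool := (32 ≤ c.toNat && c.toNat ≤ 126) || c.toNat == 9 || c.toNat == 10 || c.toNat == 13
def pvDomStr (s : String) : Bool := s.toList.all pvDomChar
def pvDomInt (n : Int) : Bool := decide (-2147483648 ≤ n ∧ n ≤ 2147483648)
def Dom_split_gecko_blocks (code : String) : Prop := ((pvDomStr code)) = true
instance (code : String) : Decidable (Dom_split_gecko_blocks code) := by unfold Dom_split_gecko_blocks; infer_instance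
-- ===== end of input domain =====

-- B replaces A's stateful on-the-fly block accumulation with a two-pointer scan that
-- finds each block's end and slices it out (alternative decomposition, same cost).


-- ===== PORT A =====
-- the tuple `codetypes` and the test `line[:2] in codetypes` (shared by both Pythons verbatim)
def gbCodetypes : List String := ["04", "14", "05", "15", "06", "07", "16", "17", "C0", "C2", "C3", "D2", "D3", "F2", "F3", "F4", "F5"]

def gbIsBoundary (line : String) : Bool := gbCodetypes.contains (PySem.Str.slice line none (some 2))

-- A's loop body on the state (blocks, current_block)
def gbStepA (st : List String × List String) (line : String) : List String × List String :=
  if gbIsBoundary line ∧ st.2 ≠ [] then (st.1 ++ [PySem.Str.join "\n" st.2], [line])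
  else (st.1, st.2 ++ [line])

def split_gecko_blocks (code : String) : List String :=
  let st := (PySem.Str.splitlines (PySem.Str.strip code)).foldl gbStepA ([], [])
  if st.2 ≠ [] then st.1 ++ [PySem.Str.join "\n" st.2] else st.1

-- ===== PORT B =====
-- outer while: emit the block starting at `l`; inner while (j advancing past
-- non-boundary lines) is takeWhile/dropWhile; lines[i:j] is l :: takeWhile …
def gbChunks : List String → List String
  | [] => []
  | l :: rest =>
    PySem.Str.join "\n" (l :: rest.takeWhile (fun x => !(gbIsBoundary x)))
      :: gbChunks (rest.dropWhile (fun x => !(gbIsBoundary x)))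
termination_by ls => ls.length
decreasing_by
  simpa using Nat.lt_succ_of_le (List.length_dropWhile_le _ _)

def split_gecko_blocks_alt (code : String) : List String :=
  gbChunks (PySem.Str.splitlines (PySem.Str.strip code))

-- ===== PRECONDITION & SPEC =====
def Spec_split_gecko_blocks (code : String) (out : List String) : Prop := out = split_gecko_blocks_alt code
instance (code : String) (out : List String) : Decidable (Spec_split_gecko_blocks code out) := by unfold Spec_split_gecko_blocks; infer_instance

-- ===== CLAIM (what is proved, stated in full; the proofs are below) =====
def Claim_equal_split_gecko_blocks : Prop := ∀ (code : String), Dom_split_gecko_blocks code → Spec_split_gecko_blocks code (split_gecko_blocks code)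

-- ===== LEMMAS AND PROOFS =====
-- A's loop, started with a nonempty current block `cur`, extends `cur` with the
-- non-boundary prefix of the remaining lines, flushes it, and continues like gbChunks.
theorem gbFold_eq_chunks (lines : List String) :
    ∀ (blocks cur : List String), cur ≠ [] →
    (let st := lines.foldl gbStepA (blocks, cur);
     if st.2 ≠ [] then st.1 ++ [PySem.Str.join "\n" st.2] else st.1)
    = blocks ++ (PySem.Str.join "\n" (cur ++ lines.takeWhile (fun x => !(gbIsBoundary x)))
        :: gbChunks (lines.dropWhile (fun x => !(gbIsBoundary x)))) := by
  induction lines with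
  | nil => intro blocks cur h; simp [h, gbChunks]
  | cons l ls ih =>
    intro blocks cur h
    by_cases hb : gbIsBoundary l = true
    · rw [List.foldl_cons]
      have hstep : gbStepA (blocks, cur) l = (blocks ++ [PySem.Str.join "\n" cur], [l]) := by
        simp [gbStepA, hb, h]
      rw [hstep, ih (blocks ++ [PySem.Str.join "\n" cur]) [l] (by simp)]
      simp [hb, gbChunks]
    · rw [List.foldl_cons]
      have hstep : gbStepA (blocks, cur) l = (blocks, cur ++ [l]) := by
        simp [gbStepA, hb]
      rw [hstep, ih blocks (cur ++ [l]) (by simp)]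
      simp [hb]

-- ===== VERDICT (by name: the statement is the Claim_ definition above) =====
theorem split_gecko_blocks_spec : Claim_equal_split_gecko_blocks := by
  intro code _
  unfold Spec_split_gecko_blocks split_gecko_blocks split_gecko_blocks_alt
  cases hls : PySem.Str.splitlines (PySem.Str.strip code) with
  | nil => simp [gbChunks]
  | cons l ls =>
    have h1 : gbStepA ([], []) l = ([], [l]) := by simp [gbStepA]
    have := gbFold_eq_chunks ls [] [l] (by simp)
    simp only [List.foldl_cons, h1] at *
    simp [this, gbChunks]
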